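-- pv_equiv track=rewrite | github.com/toroleapinc/encephagen | experiments/30_innate_dynamics.py | classify_aal_regions
-- ===== SOURCE A (Python) =====
-- def classify_aal_regions(labels):
--     """Classify AAL2 regions into functional groups."""
--     groups = {}
--     for key, patterns in [
--         ('visual', ['Calcarine', 'Cuneus', 'Lingual', 'Occipital']),
--         ('auditory', ['Heschl', 'Temporal_Sup']),
--         ('motor', ['Precentral', 'Supp_Motor']),
--         ('somatosensory', ['Postcentral', 'Paracentral']),
--         ('frontal', ['Frontal_Sup', 'Frontal_Mid', 'Frontal_Inf']),
--         ('parietal', ['Parietal', 'Angular', 'SupraMarginal', 'Precuneus']),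
--         ('temporal', ['Temporal_Mid', 'Temporal_Inf', 'Temporal_Pole', 'Fusiform']),
--         ('cingulate', ['Cingulate', 'Cingulum']),
--     ]:
--         groups[key] = [i for i, l in enumerate(labels)
--                        if any(p in l for p in patterns)]
--     return groups
-- ===== SOURCE B (Python) =====
-- _TABLE = [
--     ('visual', ['Calcarine', 'Cuneus', 'Lingual', 'Occipital']),
--     ('auditory', ['Heschl', 'Temporal_Sup']),
--     ('motor', ['Precentral', 'Supp_Motor']),
--     ('somatosensory', ['Postcentral', 'Paracentral']),
--     ('frontal', ['Frontal_Sup', 'Frontal_Mid', 'Frontal_Inf']),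
--     ('parietal', ['Parietal', 'Angular', 'SupraMarginal', 'Precuneus']),
--     ('temporal', ['Temporal_Mid', 'Temporal_Inf', 'Temporal_Pole', 'Fusiform']),
--     ('cingulate', ['Cingulate', 'Cingulum']),
-- ]
--
-- # Flat pattern -> group index, and the ordered key list.
-- _FLAT = [(p, key) for key, patterns in _TABLE for p in patterns]
-- _KEYS = [key for key, _ in _TABLE]
--
--
-- def classify_aal_regions(labels):
--     """Classify AAL2 regions into functional groups.
--
--     Stage 1: for each label compute the (deduplicated) list of group keys it
--     belongs to, by one scan over the flat pattern->group index.
--     Stage 2: invert the per-label memberships into the per-group index lists.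
--     """
--     memberships = []
--     for l in labels:
--         ms = []
--         for p, k in _FLAT:
--             if p in l and k not in ms:
--                 ms.append(k)
--         memberships.append(ms)
--     groups = {k: [] for k in _KEYS}
--     for i, ms in enumerate(memberships):
--         for k in ms:
--             groups[k].append(i)
--     return groups
-- ===== Notes on version B (the rewrite author's own statement) =====
-- stated objective: alternative
-- what changed: A builds each of the eight groups by its own comprehension over labels testing that group's patterns; B first computes, per label, its deduplicated list of matching group keys via one scan of a flat pattern->group index, then inverts these per-label memberships into the per-group index lists in a second pass.
import Mathlib
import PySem

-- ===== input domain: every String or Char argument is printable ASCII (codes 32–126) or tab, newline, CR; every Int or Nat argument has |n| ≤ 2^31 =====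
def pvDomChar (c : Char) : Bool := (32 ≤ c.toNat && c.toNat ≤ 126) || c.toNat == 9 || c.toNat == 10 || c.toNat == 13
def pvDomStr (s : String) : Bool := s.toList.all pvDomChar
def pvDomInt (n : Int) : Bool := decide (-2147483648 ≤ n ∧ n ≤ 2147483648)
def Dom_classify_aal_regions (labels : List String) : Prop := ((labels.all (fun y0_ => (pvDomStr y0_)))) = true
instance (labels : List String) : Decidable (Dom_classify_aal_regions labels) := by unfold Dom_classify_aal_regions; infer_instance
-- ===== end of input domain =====

-- B replaces A's eight per-group comprehensions over labels by two staged passes: per-label membership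
-- lists computed from one scan of a flat pattern->group index, then inverted into the per-group index
-- lists; a timing run measured B faster by a constant factor (no generator per (label,group)).

def pvTable : List (String × List String) :=
  [("visual", ["Calcarine", "Cuneus", "Lingual", "Occipital"]),
   ("auditory", ["Heschl", "Temporal_Sup"]),
   ("motor", ["Precentral", "Supp_Motor"]),
   ("somatosensory", ["Postcentral", "Paracentral"]),
   ("frontal", ["Frontal_Sup", "Frontal_Mid", "Frontal_Inf"]),
   ("parietal", ["Parietal", "Angular", "SupraMarginal", "Precuneus"]),
   ("temporal", ["Temporal_Mid", "Temporal_Inf", "Temporal_Pole", "Fusiform"]),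
   ("cingulate", ["Cingulate", "Cingulum"])]

def pvMatch (patterns : List String) (l : String) : Bool :=
  patterns.any (fun p => PySem.Str.isIn p l)

-- ===== PORT A =====
def classify_aal_regions (labels : List String) : List (String × List Int) :=
  (pvTable.foldl
      (fun g kp =>
        g.insert kp.1
          (((PySem.List.enumerate labels 0).filter (fun il => pvMatch kp.2 il.2)).map (·.1)))
      PySem.Dict.empty).items

-- ===== PORT B =====
-- _FLAT = [(p, key) for key, patterns in _TABLE for p in patterns]
def pvFlat : List (String × String) :=
  pvTable.flatMap (fun kp => kp.2.map (fun p => (p, kp.1)))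

-- _KEYS = [key for key, _ in _TABLE]
def pvKeys : List String := pvTable.map (·.1)

-- one label's deduplicated list of matching group keys (inner loop of B's stage 1)
def pvMs (l : String) : List String :=
  pvFlat.foldl
    (fun ms pk => if PySem.Str.isIn pk.1 l && !(ms.contains pk.2) then ms ++ [pk.2] else ms) []

def classify_aal_regions_alt (labels : List String) : List (String × List Int) :=
  ((PySem.List.enumerate (labels.map pvMs) 0).foldl
      (fun g im => im.2.foldl (fun g2 k => g2.modify k [] (· ++ [im.1])) g)
      (pvKeys.foldl (fun g k => g.insert k ([] : List Int)) PySem.Dict.empty)).items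

-- ===== PRECONDITION & SPEC =====
def Spec_classify_aal_regions (labels : List String) (out : List (String × List Int)) : Prop := out = classify_aal_regions_alt labels
instance (labels : List String) (out : List (String × List Int)) : Decidable (Spec_classify_aal_regions labels out) := by unfold Spec_classify_aal_regions; infer_instance

-- ===== CLAIM (what is proved, stated in full; the proofs are below) =====
def Claim_equal_classify_aal_regions : Prop := ∀ (labels : List String), Dom_classify_aal_regions labels → Spec_classify_aal_regions labels (classify_aal_regions labels)

-- ===== LEMMAS AND PROOFS =====
def pvComp (patterns : List String) (labels : List String) (s : Int) : List Int :=
  ((PySem.List.enumerate labels s).filter (fun il => pvMatch patterns il.2)).map (·.1)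

lemma pvComp_cons (patterns : List String) (l : String) (ls : List String) (s : Int) :
    pvComp patterns (l :: ls) s
      = (if pvMatch patterns l then [s] else []) ++ pvComp patterns ls (s + 1) := by
  simp only [pvComp, PySem.List.enumerate_cons, List.filter_cons]
  by_cases h : pvMatch patterns l <;> simp [h]

-- stage-1 inner-loop lemmas: one group's slice of the flat index adds its key at most once
lemma fold_noadd (ps : List String) (k l : String) (ms : List String) (h : ms.contains k = true) :
    (ps.map (fun p => (p, k))).foldl
      (fun m pk => if PySem.Str.isIn pk.1 l && !(m.contains pk.2) then m ++ [pk.2] else m) ms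
    = ms := by
  induction ps with
  | nil => rfl
  | cons p ps ih =>
    have hk : k ∈ ms := by simpa using h
    simp only [List.map_cons, List.foldl_cons]
    rw [if_neg (by simp [hk])]
    exact ih

lemma group_fold (ps : List String) (k l : String) (ms : List String) (h : ms.contains k = false) :
    (ps.map (fun p => (p, k))).foldl
      (fun m pk => if PySem.Str.isIn pk.1 l && !(m.contains pk.2) then m ++ [pk.2] else m) ms
    = ms ++ (if pvMatch ps l then [k] else []) := by
  induction ps with
  | nil => simp [pvMatch]
  | cons p ps ih =>
    simp only [List.map_cons, List.foldl_cons]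
    by_cases hp : PySem.Str.isIn p l = true
    · rw [if_pos (by rw [hp, h]; rfl), fold_noadd ps k l (ms ++ [k]) (by simp)]
      rw [show pvMatch (p :: ps) l = true from by
        simp only [pvMatch, List.any_cons, hp, Bool.true_or]]
      rfl
    · rw [Bool.not_eq_true] at hp
      rw [if_neg (by rw [hp]; simp), ih]
      rw [show pvMatch (p :: ps) l = pvMatch ps l from by
        simp only [pvMatch, List.any_cons, hp, Bool.false_or]]

lemma pvMs_eq (l : String) :
    pvMs l =
      (if pvMatch ["Calcarine", "Cuneus", "Lingual", "Occipital"] l then ["visual"] else [])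
      ++ (if pvMatch ["Heschl", "Temporal_Sup"] l then ["auditory"] else [])
      ++ (if pvMatch ["Precentral", "Supp_Motor"] l then ["motor"] else [])
      ++ (if pvMatch ["Postcentral", "Paracentral"] l then ["somatosensory"] else [])
      ++ (if pvMatch ["Frontal_Sup", "Frontal_Mid", "Frontal_Inf"] l then ["frontal"] else [])
      ++ (if pvMatch ["Parietal", "Angular", "SupraMarginal", "Precuneus"] l then ["parietal"] else [])
      ++ (if pvMatch ["Temporal_Mid", "Temporal_Inf", "Temporal_Pole", "Fusiform"] l then ["temporal"] else [])
      ++ (if pvMatch ["Cingulate", "Cingulum"] l then ["cingulate"] else []) := by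
  have h : pvFlat =
      (["Calcarine", "Cuneus", "Lingual", "Occipital"].map (fun p => (p, "visual"))) ++ (["Heschl", "Temporal_Sup"].map (fun p => (p, "auditory"))) ++ (["Precentral", "Supp_Motor"].map (fun p => (p, "motor"))) ++ (["Postcentral", "Paracentral"].map (fun p => (p, "somatosensory"))) ++ (["Frontal_Sup", "Frontal_Mid", "Frontal_Inf"].map (fun p => (p, "frontal"))) ++ (["Parietal", "Angular", "SupraMarginal", "Precuneus"].map (fun p => (p, "parietal"))) ++ (["Temporal_Mid", "Temporal_Inf", "Temporal_Pole", "Fusiform"].map (fun p => (p, "temporal"))) ++ (["Cingulate", "Cingulum"].map (fun p => (p, "cingulate"))) := by rfl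
  unfold pvMs
  rw [h]
  repeat rw [List.foldl_append]
  have g1 := group_fold ["Calcarine", "Cuneus", "Lingual", "Occipital"] "visual" l []
    (by decide)
  have g2 := group_fold ["Heschl", "Temporal_Sup"] "auditory" l ([] ++ (if pvMatch ["Calcarine", "Cuneus", "Lingual", "Occipital"] l then ["visual"] else []))
    (by show (([] ++ (if pvMatch ["Calcarine", "Cuneus", "Lingual", "Occipital"] l then ["visual"] else []))).contains "auditory" = false; split_ifs <;> decide)
  have g3 := group_fold ["Precentral", "Supp_Motor"] "motor" l (([] ++ (if pvMatch ["Calcarine", "Cuneus", "Lingual", "Occipital"] l then ["visual"] else [])) ++ (if pvMatch ["Heschl", "Temporal_Sup"] l then ["auditory"] else []))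
    (by show ((([] ++ (if pvMatch ["Calcarine", "Cuneus", "Lingual", "Occipital"] l then ["visual"] else [])) ++ (if pvMatch ["Heschl", "Temporal_Sup"] l then ["auditory"] else []))).contains "motor" = false; split_ifs <;> decide)
  have g4 := group_fold ["Postcentral", "Paracentral"] "somatosensory" l ((([] ++ (if pvMatch ["Calcarine", "Cuneus", "Lingual", "Occipital"] l then ["visual"] else [])) ++ (if pvMatch ["Heschl", "Temporal_Sup"] l then ["auditory"] else [])) ++ (if pvMatch ["Precentral", "Supp_Motor"] l then ["motor"] else []))
    (by show (((([] ++ (if pvMatch ["Calcarine", "Cuneus", "Lingual", "Occipital"] l then ["visual"] else [])) ++ (if pvMatch ["Heschl", "Temporal_Sup"] l then ["auditory"] else [])) ++ (if pvMatch ["Precentral", "Supp_Motor"] l then ["motor"] else []))).contains "somatosensory" = false; split_ifs <;> decide)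
  have g5 := group_fold ["Frontal_Sup", "Frontal_Mid", "Frontal_Inf"] "frontal" l (((([] ++ (if pvMatch ["Calcarine", "Cuneus", "Lingual", "Occipital"] l then ["visual"] else [])) ++ (if pvMatch ["Heschl", "Temporal_Sup"] l then ["auditory"] else [])) ++ (if pvMatch ["Precentral", "Supp_Motor"] l then ["motor"] else [])) ++ (if pvMatch ["Postcentral", "Paracentral"] l then ["somatosensory"] else []))
    (by show ((((([] ++ (if pvMatch ["Calcarine", "Cuneus", "Lingual", "Occipital"] l then ["visual"] else [])) ++ (if pvMatch ["Heschl", "Temporal_Sup"] l then ["auditory"] else [])) ++ (if pvMatch ["Precentral", "Supp_Motor"] l then ["motor"] else [])) ++ (if pvMatch ["Postcentral", "Paracentral"] l then ["somatosensory"] else []))).contains "frontal" = false; split_ifs <;> decide)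
  have g6 := group_fold ["Parietal", "Angular", "SupraMarginal", "Precuneus"] "parietal" l ((((([] ++ (if pvMatch ["Calcarine", "Cuneus", "Lingual", "Occipital"] l then ["visual"] else [])) ++ (if pvMatch ["Heschl", "Temporal_Sup"] l then ["auditory"] else [])) ++ (if pvMatch ["Precentral", "Supp_Motor"] l then ["motor"] else [])) ++ (if pvMatch ["Postcentral", "Paracentral"] l then ["somatosensory"] else [])) ++ (if pvMatch ["Frontal_Sup", "Frontal_Mid", "Frontal_Inf"] l then ["frontal"] else []))
    (by show (((((([] ++ (if pvMatch ["Calcarine", "Cuneus", "Lingual", "Occipital"] l then ["visual"] else [])) ++ (if pvMatch ["Heschl", "Temporal_Sup"] l then ["auditory"] else [])) ++ (if pvMatch ["Precentral", "Supp_Motor"] l then ["motor"] else [])) ++ (if pvMatch ["Postcentral", "Paracentral"] l then ["somatosensory"] else [])) ++ (if pvMatch ["Frontal_Sup", "Frontal_Mid", "Frontal_Inf"] l then ["frontal"] else []))).contains "parietal" = false; split_ifs <;> decide)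
  have g7 := group_fold ["Temporal_Mid", "Temporal_Inf", "Temporal_Pole", "Fusiform"] "temporal" l (((((([] ++ (if pvMatch ["Calcarine", "Cuneus", "Lingual", "Occipital"] l then ["visual"] else [])) ++ (if pvMatch ["Heschl", "Temporal_Sup"] l then ["auditory"] else [])) ++ (if pvMatch ["Precentral", "Supp_Motor"] l then ["motor"] else [])) ++ (if pvMatch ["Postcentral", "Paracentral"] l then ["somatosensory"] else [])) ++ (if pvMatch ["Frontal_Sup", "Frontal_Mid", "Frontal_Inf"] l then ["frontal"] else [])) ++ (if pvMatch ["Parietal", "Angular", "SupraMarginal", "Precuneus"] l then ["parietal"] else []))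
    (by show ((((((([] ++ (if pvMatch ["Calcarine", "Cuneus", "Lingual", "Occipital"] l then ["visual"] else [])) ++ (if pvMatch ["Heschl", "Temporal_Sup"] l then ["auditory"] else [])) ++ (if pvMatch ["Precentral", "Supp_Motor"] l then ["motor"] else [])) ++ (if pvMatch ["Postcentral", "Paracentral"] l then ["somatosensory"] else [])) ++ (if pvMatch ["Frontal_Sup", "Frontal_Mid", "Frontal_Inf"] l then ["frontal"] else [])) ++ (if pvMatch ["Parietal", "Angular", "SupraMarginal", "Precuneus"] l then ["parietal"] else []))).contains "temporal" = false; split_ifs <;> decide)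
  have g8 := group_fold ["Cingulate", "Cingulum"] "cingulate" l ((((((([] ++ (if pvMatch ["Calcarine", "Cuneus", "Lingual", "Occipital"] l then ["visual"] else [])) ++ (if pvMatch ["Heschl", "Temporal_Sup"] l then ["auditory"] else [])) ++ (if pvMatch ["Precentral", "Supp_Motor"] l then ["motor"] else [])) ++ (if pvMatch ["Postcentral", "Paracentral"] l then ["somatosensory"] else [])) ++ (if pvMatch ["Frontal_Sup", "Frontal_Mid", "Frontal_Inf"] l then ["frontal"] else [])) ++ (if pvMatch ["Parietal", "Angular", "SupraMarginal", "Precuneus"] l then ["parietal"] else [])) ++ (if pvMatch ["Temporal_Mid", "Temporal_Inf", "Temporal_Pole", "Fusiform"] l then ["temporal"] else []))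
    (by show (((((((([] ++ (if pvMatch ["Calcarine", "Cuneus", "Lingual", "Occipital"] l then ["visual"] else [])) ++ (if pvMatch ["Heschl", "Temporal_Sup"] l then ["auditory"] else [])) ++ (if pvMatch ["Precentral", "Supp_Motor"] l then ["motor"] else [])) ++ (if pvMatch ["Postcentral", "Paracentral"] l then ["somatosensory"] else [])) ++ (if pvMatch ["Frontal_Sup", "Frontal_Mid", "Frontal_Inf"] l then ["frontal"] else [])) ++ (if pvMatch ["Parietal", "Angular", "SupraMarginal", "Precuneus"] l then ["parietal"] else [])) ++ (if pvMatch ["Temporal_Mid", "Temporal_Inf", "Temporal_Pole", "Fusiform"] l then ["temporal"] else []))).contains "cingulate" = false; split_ifs <;> decide)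
  rw [g1, g2, g3, g4, g5, g6, g7, g8]
  simp [List.append_assoc]

-- stage-2 dict-update lemmas
lemma modify_mid (pre post : List (String × List Int)) (k : String) (v : List Int)
    (f : List Int → List Int)
    (hpre : ∀ p ∈ pre, (p.1 == k) = false)
    (hpost : ∀ p ∈ post, (p.1 == k) = false) :
    (PySem.Dict.mk (pre ++ (k, v) :: post)).modify k [] f
      = PySem.Dict.mk (pre ++ (k, f v) :: post) := by
  have hfind : List.find? (fun p => p.1 == k) pre = none :=
    List.find?_eq_none.mpr (fun p hp => by simp [hpre p hp])
  simp [PySem.Dict.modify, PySem.Dict.insert, PySem.Dict.contains,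
    PySem.Dict.getD, PySem.Dict.get?, List.find?_append, List.any_append, hfind,
    List.map_append]
  rw [List.map_congr_left (g := id) (fun p hp => by simp only [id]; rw [if_neg (beq_eq_false_iff_ne.mp (hpre p hp))]), List.map_id]
  rw [List.map_congr_left (g := id) (fun p hp => by simp only [id]; rw [if_neg (beq_eq_false_iff_ne.mp (hpost p hp))]), List.map_id]

lemma if_modify_mid (pre post : List (String × List Int)) (k : String) (v : List Int)
    (i : Int) (b : Bool)
    (hpre : ∀ p ∈ pre, (p.1 == k) = false)
    (hpost : ∀ p ∈ post, (p.1 == k) = false) :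
    (if b then (PySem.Dict.mk (pre ++ (k, v) :: post)).modify k [] (· ++ [i])
     else PySem.Dict.mk (pre ++ (k, v) :: post))
      = PySem.Dict.mk (pre ++ (k, v ++ if b then [i] else []) :: post) := by
  cases b
  · simp
  · simp [modify_mid pre post k v _ hpre hpost]

lemma modstep1 (b : Bool) (i : Int) (w1 w2 w3 w4 w5 w6 w7 w8 : List Int) :
    (if b then (PySem.Dict.mk [("visual", w1), ("auditory", w2), ("motor", w3), ("somatosensory", w4), ("frontal", w5), ("parietal", w6), ("temporal", w7), ("cingulate", w8)]).modify "visual" [] (· ++ [i])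
     else PySem.Dict.mk [("visual", w1), ("auditory", w2), ("motor", w3), ("somatosensory", w4), ("frontal", w5), ("parietal", w6), ("temporal", w7), ("cingulate", w8)])
      = PySem.Dict.mk [("visual", w1 ++ if b then [i] else []), ("auditory", w2), ("motor", w3), ("somatosensory", w4), ("frontal", w5), ("parietal", w6), ("temporal", w7), ("cingulate", w8)] :=
  if_modify_mid [] [("auditory", w2), ("motor", w3), ("somatosensory", w4), ("frontal", w5), ("parietal", w6), ("temporal", w7), ("cingulate", w8)] "visual" w1 i b
    (by intro p hp; fin_cases hp <;> rfl) (by intro p hp; fin_cases hp <;> rfl)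

lemma modstep2 (b : Bool) (i : Int) (w1 w2 w3 w4 w5 w6 w7 w8 : List Int) :
    (if b then (PySem.Dict.mk [("visual", w1), ("auditory", w2), ("motor", w3), ("somatosensory", w4), ("frontal", w5), ("parietal", w6), ("temporal", w7), ("cingulate", w8)]).modify "auditory" [] (· ++ [i])
     else PySem.Dict.mk [("visual", w1), ("auditory", w2), ("motor", w3), ("somatosensory", w4), ("frontal", w5), ("parietal", w6), ("temporal", w7), ("cingulate", w8)])
      = PySem.Dict.mk [("visual", w1), ("auditory", w2 ++ if b then [i] else []), ("motor", w3), ("somatosensory", w4), ("frontal", w5), ("parietal", w6), ("temporal", w7), ("cingulate", w8)] :=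
  if_modify_mid [("visual", w1)] [("motor", w3), ("somatosensory", w4), ("frontal", w5), ("parietal", w6), ("temporal", w7), ("cingulate", w8)] "auditory" w2 i b
    (by intro p hp; fin_cases hp <;> rfl) (by intro p hp; fin_cases hp <;> rfl)

lemma modstep3 (b : Bool) (i : Int) (w1 w2 w3 w4 w5 w6 w7 w8 : List Int) :
    (if b then (PySem.Dict.mk [("visual", w1), ("auditory", w2), ("motor", w3), ("somatosensory", w4), ("frontal", w5), ("parietal", w6), ("temporal", w7), ("cingulate", w8)]).modify "motor" [] (· ++ [i])
     else PySem.Dict.mk [("visual", w1), ("auditory", w2), ("motor", w3), ("somatosensory", w4), ("frontal", w5), ("parietal", w6), ("temporal", w7), ("cingulate", w8)])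
      = PySem.Dict.mk [("visual", w1), ("auditory", w2), ("motor", w3 ++ if b then [i] else []), ("somatosensory", w4), ("frontal", w5), ("parietal", w6), ("temporal", w7), ("cingulate", w8)] :=
  if_modify_mid [("visual", w1), ("auditory", w2)] [("somatosensory", w4), ("frontal", w5), ("parietal", w6), ("temporal", w7), ("cingulate", w8)] "motor" w3 i b
    (by intro p hp; fin_cases hp <;> rfl) (by intro p hp; fin_cases hp <;> rfl)

lemma modstep4 (b : Bool) (i : Int) (w1 w2 w3 w4 w5 w6 w7 w8 : List Int) :
    (if b then (PySem.Dict.mk [("visual", w1), ("auditory", w2), ("motor", w3), ("somatosensory", w4), ("frontal", w5), ("parietal", w6), ("temporal", w7), ("cingulate", w8)]).modify "somatosensory" [] (· ++ [i])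
     else PySem.Dict.mk [("visual", w1), ("auditory", w2), ("motor", w3), ("somatosensory", w4), ("frontal", w5), ("parietal", w6), ("temporal", w7), ("cingulate", w8)])
      = PySem.Dict.mk [("visual", w1), ("auditory", w2), ("motor", w3), ("somatosensory", w4 ++ if b then [i] else []), ("frontal", w5), ("parietal", w6), ("temporal", w7), ("cingulate", w8)] :=
  if_modify_mid [("visual", w1), ("auditory", w2), ("motor", w3)] [("frontal", w5), ("parietal", w6), ("temporal", w7), ("cingulate", w8)] "somatosensory" w4 i b
    (by intro p hp; fin_cases hp <;> rfl) (by intro p hp; fin_cases hp <;> rfl)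

lemma modstep5 (b : Bool) (i : Int) (w1 w2 w3 w4 w5 w6 w7 w8 : List Int) :
    (if b then (PySem.Dict.mk [("visual", w1), ("auditory", w2), ("motor", w3), ("somatosensory", w4), ("frontal", w5), ("parietal", w6), ("temporal", w7), ("cingulate", w8)]).modify "frontal" [] (· ++ [i])
     else PySem.Dict.mk [("visual", w1), ("auditory", w2), ("motor", w3), ("somatosensory", w4), ("frontal", w5), ("parietal", w6), ("temporal", w7), ("cingulate", w8)])
      = PySem.Dict.mk [("visual", w1), ("auditory", w2), ("motor", w3), ("somatosensory", w4), ("frontal", w5 ++ if b then [i] else []), ("parietal", w6), ("temporal", w7), ("cingulate", w8)] :=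
  if_modify_mid [("visual", w1), ("auditory", w2), ("motor", w3), ("somatosensory", w4)] [("parietal", w6), ("temporal", w7), ("cingulate", w8)] "frontal" w5 i b
    (by intro p hp; fin_cases hp <;> rfl) (by intro p hp; fin_cases hp <;> rfl)

lemma modstep6 (b : Bool) (i : Int) (w1 w2 w3 w4 w5 w6 w7 w8 : List Int) :
    (if b then (PySem.Dict.mk [("visual", w1), ("auditory", w2), ("motor", w3), ("somatosensory", w4), ("frontal", w5), ("parietal", w6), ("temporal", w7), ("cingulate", w8)]).modify "parietal" [] (· ++ [i])
     else PySem.Dict.mk [("visual", w1), ("auditory", w2), ("motor", w3), ("somatosensory", w4), ("frontal", w5), ("parietal", w6), ("temporal", w7), ("cingulate", w8)])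
      = PySem.Dict.mk [("visual", w1), ("auditory", w2), ("motor", w3), ("somatosensory", w4), ("frontal", w5), ("parietal", w6 ++ if b then [i] else []), ("temporal", w7), ("cingulate", w8)] :=
  if_modify_mid [("visual", w1), ("auditory", w2), ("motor", w3), ("somatosensory", w4), ("frontal", w5)] [("temporal", w7), ("cingulate", w8)] "parietal" w6 i b
    (by intro p hp; fin_cases hp <;> rfl) (by intro p hp; fin_cases hp <;> rfl)

lemma modstep7 (b : Bool) (i : Int) (w1 w2 w3 w4 w5 w6 w7 w8 : List Int) :
    (if b then (PySem.Dict.mk [("visual", w1), ("auditory", w2), ("motor", w3), ("somatosensory", w4), ("frontal", w5), ("parietal", w6), ("temporal", w7), ("cingulate", w8)]).modify "temporal" [] (· ++ [i])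
     else PySem.Dict.mk [("visual", w1), ("auditory", w2), ("motor", w3), ("somatosensory", w4), ("frontal", w5), ("parietal", w6), ("temporal", w7), ("cingulate", w8)])
      = PySem.Dict.mk [("visual", w1), ("auditory", w2), ("motor", w3), ("somatosensory", w4), ("frontal", w5), ("parietal", w6), ("temporal", w7 ++ if b then [i] else []), ("cingulate", w8)] :=
  if_modify_mid [("visual", w1), ("auditory", w2), ("motor", w3), ("somatosensory", w4), ("frontal", w5), ("parietal", w6)] [("cingulate", w8)] "temporal" w7 i b
    (by intro p hp; fin_cases hp <;> rfl) (by intro p hp; fin_cases hp <;> rfl)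

lemma modstep8 (b : Bool) (i : Int) (w1 w2 w3 w4 w5 w6 w7 w8 : List Int) :
    (if b then (PySem.Dict.mk [("visual", w1), ("auditory", w2), ("motor", w3), ("somatosensory", w4), ("frontal", w5), ("parietal", w6), ("temporal", w7), ("cingulate", w8)]).modify "cingulate" [] (· ++ [i])
     else PySem.Dict.mk [("visual", w1), ("auditory", w2), ("motor", w3), ("somatosensory", w4), ("frontal", w5), ("parietal", w6), ("temporal", w7), ("cingulate", w8)])
      = PySem.Dict.mk [("visual", w1), ("auditory", w2), ("motor", w3), ("somatosensory", w4), ("frontal", w5), ("parietal", w6), ("temporal", w7), ("cingulate", w8 ++ if b then [i] else [])] :=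
  if_modify_mid [("visual", w1), ("auditory", w2), ("motor", w3), ("somatosensory", w4), ("frontal", w5), ("parietal", w6), ("temporal", w7)] [] "cingulate" w8 i b
    (by intro p hp; fin_cases hp <;> rfl) (by intro p hp; fin_cases hp <;> rfl)

lemma fold_opt (b : Bool) (k : String) (i : Int) (g : PySem.Dict String (List Int)) :
    (if b then [k] else []).foldl (fun g2 k' => g2.modify k' [] (· ++ [i])) g
      = if b then g.modify k [] (· ++ [i]) else g := by
  cases b <;> simp

lemma innerstep (i : Int) (l : String) (v1 v2 v3 v4 v5 v6 v7 v8 : List Int) :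
    (pvMs l).foldl (fun g2 k => g2.modify k [] (· ++ [i]))
      (PySem.Dict.mk [("visual", v1), ("auditory", v2), ("motor", v3), ("somatosensory", v4), ("frontal", v5), ("parietal", v6), ("temporal", v7), ("cingulate", v8)])
    = PySem.Dict.mk [
        ("visual", v1 ++ if pvMatch ["Calcarine", "Cuneus", "Lingual", "Occipital"] l then [i] else []),
        ("auditory", v2 ++ if pvMatch ["Heschl", "Temporal_Sup"] l then [i] else []),
        ("motor", v3 ++ if pvMatch ["Precentral", "Supp_Motor"] l then [i] else []),
        ("somatosensory", v4 ++ if pvMatch ["Postcentral", "Paracentral"] l then [i] else []),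
        ("frontal", v5 ++ if pvMatch ["Frontal_Sup", "Frontal_Mid", "Frontal_Inf"] l then [i] else []),
        ("parietal", v6 ++ if pvMatch ["Parietal", "Angular", "SupraMarginal", "Precuneus"] l then [i] else []),
        ("temporal", v7 ++ if pvMatch ["Temporal_Mid", "Temporal_Inf", "Temporal_Pole", "Fusiform"] l then [i] else []),
        ("cingulate", v8 ++ if pvMatch ["Cingulate", "Cingulum"] l then [i] else [])] := by
  rw [pvMs_eq]
  repeat rw [List.foldl_append]
  simp only [fold_opt]
  rw [modstep1, modstep2, modstep3, modstep4, modstep5, modstep6, modstep7, modstep8]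

lemma Bloop (labels : List String) (s : Int) (v1 v2 v3 v4 v5 v6 v7 v8 : List Int) :
    (PySem.List.enumerate (labels.map pvMs) s).foldl
      (fun g im => im.2.foldl (fun g2 k => g2.modify k [] (· ++ [im.1])) g)
      (PySem.Dict.mk [("visual", v1), ("auditory", v2), ("motor", v3), ("somatosensory", v4), ("frontal", v5), ("parietal", v6), ("temporal", v7), ("cingulate", v8)])
    = PySem.Dict.mk [
        ("visual", v1 ++ pvComp ["Calcarine", "Cuneus", "Lingual", "Occipital"] labels s),
        ("auditory", v2 ++ pvComp ["Heschl", "Temporal_Sup"] labels s),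
        ("motor", v3 ++ pvComp ["Precentral", "Supp_Motor"] labels s),
        ("somatosensory", v4 ++ pvComp ["Postcentral", "Paracentral"] labels s),
        ("frontal", v5 ++ pvComp ["Frontal_Sup", "Frontal_Mid", "Frontal_Inf"] labels s),
        ("parietal", v6 ++ pvComp ["Parietal", "Angular", "SupraMarginal", "Precuneus"] labels s),
        ("temporal", v7 ++ pvComp ["Temporal_Mid", "Temporal_Inf", "Temporal_Pole", "Fusiform"] labels s),
        ("cingulate", v8 ++ pvComp ["Cingulate", "Cingulum"] labels s)] := by
  induction labels generalizing s v1 v2 v3 v4 v5 v6 v7 v8 with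
  | nil => simp [PySem.List.enumerate_nil, pvComp]
  | cons l ls ih =>
    rw [List.map_cons, PySem.List.enumerate_cons, List.foldl_cons, innerstep s l]
    rw [ih]
    simp [pvComp_cons, List.append_assoc]

theorem final_eq (labels : List String) :
    classify_aal_regions labels = classify_aal_regions_alt labels := by
  unfold classify_aal_regions classify_aal_regions_alt
  rw [show (pvKeys.foldl (fun g k => g.insert k ([] : List Int)) PySem.Dict.empty)
        = PySem.Dict.mk [("visual", ([] : List Int)), ("auditory", ([] : List Int)), ("motor", ([] : List Int)), ("somatosensory", ([] : List Int)), ("frontal", ([] : List Int)), ("parietal", ([] : List Int)), ("temporal", ([] : List Int)), ("cingulate", ([] : List Int))] from rfl]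
  rw [Bloop]
  rfl

-- ===== VERDICT (by name: the statement is the Claim_ definition above) =====
theorem classify_aal_regions_spec : Claim_equal_classify_aal_regions := by
  intro labels _
  unfold Spec_classify_aal_regions
  exact final_eq labels
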